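-- pv_equiv track=rewrite | github.com/yongchann/problem-solving | 프로그래머스/2/77485. 행렬 테두리 회전하기/행렬 테두리 회전하기.py | get_target_coordinate
-- ===== SOURCE A (Python) =====
-- def get_target_coordinate(x1, y1, x2, y2):
--     s = []
--     for y in range(y1, y2):
--         s.append([x1, y])
--     for x in range(x1, x2):
--         s.append([x, y2])
--     for y in range(y2, y1, -1):
--         s.append([x2, y])
--     for x in range(x2, x1, -1):
--         s.append([x, y1])
--     return s
-- ===== SOURCE B (Python) =====
-- def get_target_coordinate(x1, y1, x2, y2):
--     # Columnar construction: build the x-track and the y-track of the border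
--     # walk separately with bulk list operations, then zip them into coordinates.
--     h = max(y2 - y1, 0)
--     w = max(x2 - x1, 0)
--     xs = [x1] * h + list(range(x1, x1 + w)) + [x2] * h + list(range(x2, x2 - w, -1))
--     ys = list(range(y1, y1 + h)) + [y2] * w + list(range(y2, y2 - h, -1)) + [y1] * w
--     return list(map(list, zip(xs, ys)))
-- ===== Notes on version B (the rewrite author's own statement) =====
-- stated objective: alternative
-- what changed: Instead of emitting border points side by side in four loops, B builds the whole x-track and y-track of the border walk as flat lists via bulk list operations (replication and ranges, clamped to 0 for degenerate rectangles) and zips the two tracks into the coordinate list.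
import Mathlib
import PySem

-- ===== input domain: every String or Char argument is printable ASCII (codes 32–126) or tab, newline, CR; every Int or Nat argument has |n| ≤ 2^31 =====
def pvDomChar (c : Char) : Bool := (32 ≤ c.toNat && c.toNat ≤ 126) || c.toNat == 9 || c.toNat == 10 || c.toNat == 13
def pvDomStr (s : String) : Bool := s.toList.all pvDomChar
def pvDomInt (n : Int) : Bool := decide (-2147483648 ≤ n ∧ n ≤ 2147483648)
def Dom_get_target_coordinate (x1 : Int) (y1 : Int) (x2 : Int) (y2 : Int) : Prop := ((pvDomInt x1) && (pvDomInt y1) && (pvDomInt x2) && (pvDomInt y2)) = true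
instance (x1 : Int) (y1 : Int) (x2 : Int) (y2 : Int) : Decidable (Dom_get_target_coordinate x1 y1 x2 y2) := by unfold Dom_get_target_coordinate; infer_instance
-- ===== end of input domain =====

-- B builds the x-track and y-track of the border walk as whole lists (replication and
-- ranges, clamped for degenerate rectangles) and zips them, instead of A's four
-- point-by-point side loops; same cost, different construction.

-- ===== PORT A =====
def get_target_coordinate (x1 : Int) (y1 : Int) (x2 : Int) (y2 : Int) : List (List Int) :=
  let s : List (List Int) := []
  let s := (PySem.List.pyRange y1 y2 1).foldl (fun s y => s ++ [[x1, y]]) s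
  let s := (PySem.List.pyRange x1 x2 1).foldl (fun s x => s ++ [[x, y2]]) s
  let s := (PySem.List.pyRange y2 y1 (-1)).foldl (fun s y => s ++ [[x2, y]]) s
  let s := (PySem.List.pyRange x2 x1 (-1)).foldl (fun s x => s ++ [[x, y1]]) s
  s

-- ===== PORT B =====
def get_target_coordinate_alt (x1 : Int) (y1 : Int) (x2 : Int) (y2 : Int) : List (List Int) :=
  let h := max (y2 - y1) 0
  let w := max (x2 - x1) 0
  let xs := List.replicate h.toNat x1 ++ PySem.List.pyRange x1 (x1 + w) 1
            ++ List.replicate h.toNat x2 ++ PySem.List.pyRange x2 (x2 - w) (-1)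
  let ys := PySem.List.pyRange y1 (y1 + h) 1 ++ List.replicate w.toNat y2
            ++ PySem.List.pyRange y2 (y2 - h) (-1) ++ List.replicate w.toNat y1
  (xs.zip ys).map (fun p => [p.1, p.2])

-- ===== PRECONDITION & SPEC =====
def Spec_get_target_coordinate (x1 : Int) (y1 : Int) (x2 : Int) (y2 : Int) (out : List (List Int)) : Prop := out = get_target_coordinate_alt x1 y1 x2 y2
instance (x1 : Int) (y1 : Int) (x2 : Int) (y2 : Int) (out : List (List Int)) : Decidable (Spec_get_target_coordinate x1 y1 x2 y2 out) := by unfold Spec_get_target_coordinate; infer_instance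

-- ===== CLAIM (what is proved, stated in full; the proofs are below) =====
def Claim_equal_get_target_coordinate : Prop := ∀ (x1 : Int) (y1 : Int) (x2 : Int) (y2 : Int), Dom_get_target_coordinate x1 y1 x2 y2 → Spec_get_target_coordinate x1 y1 x2 y2 (get_target_coordinate x1 y1 x2 y2)

-- ===== LEMMAS AND PROOFS =====

lemma zip_repl_left {α β : Type} (a : α) : ∀ (l : List β) (n : Nat), l.length = n →
    (List.replicate n a).zip l = l.map (fun y => (a, y)) := by
  intro l
  induction l with
  | nil => intro n h; subst h; simp
  | cons x t ih =>
    intro n h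
    subst h
    simp [List.replicate_succ, ih t.length rfl]

lemma zip_repl_right {α β : Type} (b : β) : ∀ (l : List α) (n : Nat), l.length = n →
    l.zip (List.replicate n b) = l.map (fun x => (x, b)) := by
  intro l
  induction l with
  | nil => intro n h; subst h; simp
  | cons x t ih =>
    intro n h
    subst h
    simp [List.replicate_succ, ih t.length rfl]

-- the main equality, with the two clamped side lengths abstracted as naturals
lemma main_eq (x1 y1 x2 y2 : Int) (H W : Nat)
    (hH : max (y2 - y1) 0 = (H : Int)) (hW : max (x2 - x1) 0 = (W : Int)) :
    get_target_coordinate x1 y1 x2 y2 = get_target_coordinate_alt x1 y1 x2 y2 := by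
  have t1 : (y2 - y1).toNat = H := by omega
  have t2 : (x2 - x1).toNat = W := by omega
  have t3 : (x1 + (W : Int) - x1).toNat = W := by omega
  have t4 : (y1 + (H : Int) - y1).toNat = H := by omega
  have t5 : (x2 - (x2 - (W : Int))).toNat = W := by omega
  have t6 : (y2 - (y2 - (H : Int))).toNat = H := by omega
  unfold get_target_coordinate get_target_coordinate_alt
  simp only [PySem.List.foldl_append_singleton_eq_map, List.nil_append, hH, hW,
    PySem.List.pyRange_one, PySem.List.pyRange_neg_one, t1, t2, t3, t4, t5, t6,
    Int.toNat_natCast]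
  rw [List.zip_append (by simp), List.zip_append (by simp), List.zip_append (by simp)]
  rw [zip_repl_left x1 _ H (by simp), zip_repl_left x2 _ H (by simp),
      zip_repl_right y2 _ W (by simp), zip_repl_right y1 _ W (by simp)]
  simp [List.map_map, Function.comp_def, List.append_assoc]

-- ===== VERDICT (by name: the statement is the Claim_ definition above) =====
theorem get_target_coordinate_spec : Claim_equal_get_target_coordinate := by
  intro x1 y1 x2 y2 _
  show get_target_coordinate x1 y1 x2 y2 = get_target_coordinate_alt x1 y1 x2 y2
  exact main_eq x1 y1 x2 y2 (y2 - y1).toNat (x2 - x1).toNat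
    ((Int.toNat_eq_max _).symm) ((Int.toNat_eq_max _).symm)
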